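-- pv_equiv track=rewrite | github.com/uranusjr/requirements-2.0 | lock.py | _iter_candidate_lines
-- ===== SOURCE A (Python) =====
-- import typing
--
-- def _iter_candidate_lines(lines: typing.Iterator[str]) -> typing.Iterator[str]:
--     curr = ""
--     for line in lines:
--         line = line.strip()
--         if not line:
--             continue
--         if line.endswith("\\"):
--             cont = True
--             line = line[:-1]
--         else:
--             cont = False
--         curr += line
--         if not cont:
--             if curr and curr[0] != "#":
--                 yield curr
--             curr = ""
-- ===== SOURCE B (Python) =====
-- import typing
--
-- def _iter_candidate_lines(lines: typing.Iterator[str]) -> typing.Iterator[str]: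
--     # Chunk-splitting instead of streaming accumulation: materialise the
--     # stripped non-blank lines, then repeatedly scan to the first
--     # non-continuation line and join that whole chunk in one go.
--     stripped = [s for s in (line.strip() for line in lines) if s]
--     n = len(stripped)
--     i = 0
--     while i < n:
--         k = i
--         while k < n and stripped[k].endswith("\\"):
--             k += 1
--         if k == n:
--             break  # dangling continuation: never terminated, dropped (as in A)
--         merged = "".join(s[:-1] for s in stripped[i:k]) + stripped[k]
--         if merged[0] != "#":
--             yield merged
--         i = k + 1
-- ===== Notes on version B (the rewrite author's own statement) =====
-- stated objective: alternative
-- what changed: Replaces A's single streaming pass with a per-line accumulator string by a chunk-splitting algorithm: materialise the stripped non-blank lines, then repeatedly find the first non-continuation line, join the whole chunk at once and slice it off; no running accumulator is kept across lines. B consumes the input iterator eagerly (return values are identical; only consumption timing differs).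
import Mathlib
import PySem

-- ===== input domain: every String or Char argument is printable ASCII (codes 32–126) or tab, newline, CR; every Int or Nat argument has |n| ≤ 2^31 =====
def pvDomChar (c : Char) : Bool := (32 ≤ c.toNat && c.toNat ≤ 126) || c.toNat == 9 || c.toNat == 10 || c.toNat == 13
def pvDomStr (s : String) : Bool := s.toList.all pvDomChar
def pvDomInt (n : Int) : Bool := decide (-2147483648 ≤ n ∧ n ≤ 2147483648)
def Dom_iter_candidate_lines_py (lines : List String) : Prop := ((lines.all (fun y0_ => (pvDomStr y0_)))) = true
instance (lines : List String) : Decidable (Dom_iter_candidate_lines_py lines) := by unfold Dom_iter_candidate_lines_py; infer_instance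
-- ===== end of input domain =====

-- B replaces A's streaming accumulator pass by chunk splitting (strip/filter, then
-- repeatedly scan to the first non-continuation line and join that chunk at once);
-- return values are equal, B merely consumes the input iterator eagerly.

-- ===== PORT A =====
-- the generator loop of A, with the pending accumulator `curr` as explicit state
def pvALoop : List String → String → List String
  | [], _ => []
  | l :: rest, curr =>
    if PySem.Str.strip l = "" then pvALoop rest curr
    else if PySem.Str.endswith (PySem.Str.strip l) "\\" then
      -- cont = True: line = line[:-1], curr += line, no yield
      pvALoop rest (curr ++ PySem.Str.slice (PySem.Str.strip l) none (some (-1)))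
    else
      -- cont = False: curr += line, yield curr if `curr and curr[0] != "#"`, reset
      (if curr ++ PySem.Str.strip l ≠ "" ∧
          PySem.Str.pyGet? (curr ++ PySem.Str.strip l) 0 ≠ some '#'
        then [curr ++ PySem.Str.strip l] else []) ++ pvALoop rest ""

def iter_candidate_lines_py (lines : List String) : List String := pvALoop lines ""

-- ===== PORT B =====
-- Source B: stripped = [s for s in (line.strip() for line in lines) if s]
def pvStripLines (lines : List String) : List String :=
  (lines.map PySem.Str.strip).filter (fun s => s ≠ "")

-- stripped[k].endswith("\\"): k stays inside the continuation run
def pvCut (s : String) : Bool := PySem.Str.endswith s "\\"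

-- Source B's inner scan: `k = i; while k < n and stripped[k].endswith("\\"): k += 1`
def pvFindStop (stripped : List String) (k : Nat) : Nat :=
  if h : k < stripped.length then
    if pvCut stripped[k] then pvFindStop stripped (k + 1) else k
  else k
  termination_by stripped.length - k

-- termination fact the port's outer loop cites: the scan never moves k backwards
theorem pvFindStop_char (xs : List String) (i : Nat) :
    pvFindStop xs i = i + ((xs.drop i).takeWhile pvCut).length := by
  rw [pvFindStop]
  by_cases h : i < xs.length
  · rw [dif_pos h]
    have hd : xs.drop i = xs[i] :: xs.drop (i + 1) := List.drop_eq_getElem_cons h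
    by_cases hc : pvCut xs[i] = true
    · rw [if_pos hc, pvFindStop_char xs (i + 1), hd, List.takeWhile_cons_of_pos hc]
      simp; omega
    · rw [if_neg hc, hd, List.takeWhile_cons_of_neg (by simpa using hc)]
      simp
  · rw [dif_neg h, List.drop_eq_nil_of_le (by omega)]
    simp
  termination_by xs.length - i

-- Source B's outer loop: `while i < n: scan to k; if k == n: break;
--   merged = "".join(s[:-1] for s in stripped[i:k]) + stripped[k]; yield?; i = k+1`
def pvChunksIdx (stripped : List String) (i : Nat) : List String :=
  if hk : pvFindStop stripped i < stripped.length then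
    let merged := PySem.Str.join ""
        ((PySem.List.slice stripped (some (i : Int)) (some ((pvFindStop stripped i : Nat) : Int))).map
          (fun s => PySem.Str.slice s none (some (-1)))) ++ stripped[pvFindStop stripped i]
    (if PySem.Str.pyGet? merged 0 ≠ some '#' then [merged] else []) ++
      pvChunksIdx stripped (pvFindStop stripped i + 1)
  else []
  termination_by stripped.length - i
  decreasing_by
    have hge : i ≤ pvFindStop stripped i := by rw [pvFindStop_char]; omega
    omega

def iter_candidate_lines_py_alt (lines : List String) : List String :=
  pvChunksIdx (pvStripLines lines) 0

-- ===== PRECONDITION & SPEC =====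
def Spec_iter_candidate_lines_py (lines : List String) (out : List String) : Prop := out = iter_candidate_lines_py_alt lines
instance (lines : List String) (out : List String) : Decidable (Spec_iter_candidate_lines_py lines out) := by unfold Spec_iter_candidate_lines_py; infer_instance

-- ===== CLAIM =====
def Claim_equal_iter_candidate_lines_py : Prop := ∀ (lines : List String), Dom_iter_candidate_lines_py lines → Spec_iter_candidate_lines_py lines (iter_candidate_lines_py lines)

-- ===== LEMMAS AND PROOFS =====

-- structural (suffix-recursion) view of B's outer loop, used only by the proofs
def pvChunks (stripped : List String) : List String :=
  match _h : stripped.dropWhile pvCut with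
  | [] => []
  | t :: rest =>
    let merged := PySem.Str.join ""
        ((stripped.takeWhile pvCut).map (fun s => PySem.Str.slice s none (some (-1)))) ++ t
    (if PySem.Str.pyGet? merged 0 ≠ some '#' then [merged] else []) ++ pvChunks rest
  termination_by stripped.length
  decreasing_by
    have hle := List.length_dropWhile_le pvCut stripped
    rw [_h] at hle; simp at hle; omega

-- A's loop restricted to the already-stripped, non-blank lines
def pvA' : List String → String → List String
  | [], _ => []
  | s :: rest, curr =>
    if pvCut s then pvA' rest (curr ++ PySem.Str.slice s none (some (-1)))
    else (if curr ++ s ≠ "" ∧ PySem.Str.pyGet? (curr ++ s) 0 ≠ some '#'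
          then [curr ++ s] else []) ++ pvA' rest ""

-- pvChunks' body with a pending prefix `curr` in front of the merged chunk
def pvExp (xs : List String) (curr : String) : List String :=
  match xs.dropWhile pvCut with
  | [] => []
  | t :: rest =>
    let merged := curr ++ PySem.Str.join ""
        ((xs.takeWhile pvCut).map (fun s => PySem.Str.slice s none (some (-1)))) ++ t
    (if PySem.Str.pyGet? merged 0 ≠ some '#' then [merged] else []) ++ pvChunks rest

-- the index-based outer loop of port B computes pvChunks on the remaining suffix
theorem pvChunksIdx_eq (xs : List String) (i : Nat) :
    pvChunksIdx xs i = pvChunks (xs.drop i) := by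
  rw [pvChunksIdx, pvChunks.eq_def]
  cases hr : (xs.drop i).dropWhile pvCut with
  | nil =>
    have hk : ¬ pvFindStop xs i < xs.length := by
      rw [pvFindStop_char]
      have h1 := congrArg List.length
        (List.takeWhile_append_dropWhile (p := pvCut) (l := xs.drop i))
      rw [hr] at h1
      simp at h1
      omega
    rw [dif_neg hk]
  | cons t0 r' =>
    set tw := (xs.drop i).takeWhile pvCut with htw
    have hsplit : xs.drop i = tw ++ t0 :: r' := by
      rw [htw, ← hr, List.takeWhile_append_dropWhile]
    have hlen := congrArg List.length hsplit
    simp only [List.length_append, List.length_cons, List.length_drop] at hlen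
    have hi : i < xs.length := by omega
    have hkval : pvFindStop xs i = i + tw.length := by rw [pvFindStop_char, htw]
    have hk : pvFindStop xs i < xs.length := by omega
    rw [dif_pos hk]
    -- the sliced chunk stripped[i:k] is exactly the takeWhile run
    have hslice : PySem.List.slice xs (some (i : Int)) (some ((pvFindStop xs i : Nat) : Int))
        = tw := by
      rw [PySem.List.slice_natCast, hkval, Nat.add_sub_cancel_left, hsplit]
      exact List.take_left
    -- stripped[k] is the first element after the run
    have hget : xs[pvFindStop xs i]'hk = t0 := by
      have h1 : xs[pvFindStop xs i]? = some t0 := by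
        rw [hkval, ← List.getElem?_drop, hsplit,
          List.getElem?_append_right (by omega)]
        simp
      simpa [List.getElem?_eq_getElem hk] using h1
    -- the rest stripped[k+1:] is the suffix after the chunk
    have hdrop : xs.drop (pvFindStop xs i + 1) = r' := by
      rw [hkval, Nat.add_assoc, ← List.drop_drop, hsplit]
      have h2 := List.drop_length_add_append (i := 1) (l₁ := tw) (l₂ := t0 :: r')
      rw [h2]
      simp
    rw [pvChunksIdx_eq xs (pvFindStop xs i + 1), hslice, hget, hdrop]
  termination_by xs.length - i
  decreasing_by omega

theorem pv_join_cons (a : String) (l : List String) :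
    PySem.Str.join "" (a :: l) = a ++ PySem.Str.join "" l := by
  apply String.toList_inj.mp
  simp [PySem.Str.toList_join, PySem.Chars.join, List.intercalate]
  cases l with
  | nil => simp
  | cons b bs => simp

theorem pv_chunks_eq_exp (xs : List String) : pvChunks xs = pvExp xs "" := by
  rw [pvChunks.eq_def, pvExp]
  cases h : xs.dropWhile pvCut <;> simp

theorem pvALoop_eq_A' (lines : List String) :
    ∀ curr, pvALoop lines curr = pvA' (pvStripLines lines) curr := by
  induction lines with
  | nil => intro curr; rfl
  | cons l rest ih =>
    intro curr
    by_cases hb : PySem.Str.strip l = ""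
    · rw [show pvStripLines (l :: rest) = pvStripLines rest by simp [pvStripLines, hb]]
      simp only [pvALoop, if_pos hb]
      exact ih curr
    · rw [show pvStripLines (l :: rest) = PySem.Str.strip l :: pvStripLines rest by
        simp [pvStripLines, hb]]
      simp only [pvALoop, if_neg hb, pvA', pvCut]
      by_cases hc : PySem.Str.endswith (PySem.Str.strip l) "\\" = true
      · simp only [if_pos hc]; exact ih _
      · simp only [if_neg hc]; rw [ih ""]

theorem pv_append_ne (curr s : String) (h : s ≠ "") : curr ++ s ≠ "" := by
  intro hc
  apply h
  have := congrArg String.toList hc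
  simp at this
  exact this.2

theorem pvA'_eq_exp (xs : List String) (hne : ∀ s ∈ xs, s ≠ "") :
    ∀ curr, pvA' xs curr = pvExp xs curr := by
  induction xs with
  | nil => intro curr; rfl
  | cons s xs' ih =>
    intro curr
    have hs : s ≠ "" := hne s (List.mem_cons_self ..)
    have hne' : ∀ t ∈ xs', t ≠ "" := fun t ht => hne t (List.mem_cons_of_mem _ ht)
    by_cases hc : pvCut s = true
    · -- continuation line: both sides shift s[:-1] into the pending prefix
      rw [show pvA' (s :: xs') curr
            = pvA' xs' (curr ++ PySem.Str.slice s none (some (-1))) by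
          simp [pvA', hc]]
      rw [ih hne' _]
      unfold pvExp
      rw [List.dropWhile_cons_of_pos hc, List.takeWhile_cons_of_pos hc]
      cases h : xs'.dropWhile pvCut with
      | nil => rfl
      | cons t rest =>
        simp only [List.map_cons]
        rw [pv_join_cons, ← String.append_assoc]
    · -- terminator line: chunk closes, tests agree because curr ++ s ≠ ""
      rw [show pvA' (s :: xs') curr
            = (if curr ++ s ≠ "" ∧ PySem.Str.pyGet? (curr ++ s) 0 ≠ some '#'
               then [curr ++ s] else []) ++ pvA' xs' "" by
          simp [pvA', hc]]
      unfold pvExp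
      rw [List.dropWhile_cons_of_neg (by simpa using hc),
          List.takeWhile_cons_of_neg (by simpa using hc)]
      simp only [List.map_nil]
      have hjoin : PySem.Str.join "" ([] : List String) = "" := rfl
      rw [hjoin, String.append_empty]
      have htest : (curr ++ s ≠ "" ∧ PySem.Str.pyGet? (curr ++ s) 0 ≠ some '#')
          ↔ PySem.Str.pyGet? (curr ++ s) 0 ≠ some '#' := by
        constructor
        · exact fun h => h.2
        · exact fun h => ⟨pv_append_ne curr s hs, h⟩
      rw [ih hne' "", ← pv_chunks_eq_exp]
      by_cases hg : PySem.Str.pyGet? (curr ++ s) 0 ≠ some '#'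
      · rw [if_pos (htest.mpr hg), if_pos hg]
      · rw [if_neg (fun hx => hg (htest.mp hx)), if_neg hg]

-- ===== VERDICT (by name: the statement is the Claim_ definition above) =====
theorem iter_candidate_lines_py_spec : Claim_equal_iter_candidate_lines_py := by
  intro lines _
  unfold Spec_iter_candidate_lines_py iter_candidate_lines_py iter_candidate_lines_py_alt
  rw [pvChunksIdx_eq, List.drop_zero, pvALoop_eq_A', pvA'_eq_exp, ← pv_chunks_eq_exp]
  intro s hsm
  have := List.of_mem_filter hsm
  simpa using this
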